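-- pv_equiv track=rewrite | github.com/rushike/rmathpy | number_theory.py | factorial_consec_prod_tree
-- ===== SOURCE A (Python) =====
-- def factorial_consec_prod_tree(low, high, m = 0) :
--     """Mulitplies the consec numbers from low to high exclusive, i.e. numbers in domain [low, high)
--
--     Arguments :
--         low {int} -- low limit, inclusive
--         high {int} --  high limit, exclusive
--
--     Keyword Arguments :
--         m {int} -- modular (default: {0})
--
--     Returns:
--         int -- low * (low + 1) * ... (high - 1)
--     """
--     if low > high :
--         if not m :
--             return factorial_consec_prod_tree(high, low)
--         return factorial_consec_prod_tree(high, low, m) % m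
--     if low + 1 < high:
--         mid = (high + low + 1) // 2
--         if not m :
--             return factorial_consec_prod_tree(low, mid) * factorial_consec_prod_tree(mid, high)
--         return (factorial_consec_prod_tree(low, mid, m) * factorial_consec_prod_tree(mid , high, m)) % m
--     if not m :
--         return low
--     return low % m
-- ===== SOURCE B (Python) =====
-- def factorial_consec_prod_tree(low, high, m = 0):
--     """Product of the integers in [low, high) (swapping the bounds if reversed),
--     reduced mod m after every step when m is nonzero; the empty range gives 1 (mod m)."""
--     if low > high:
--         low, high = high, low
--     result = 1 % m if m else 1
--     for i in range(low, high):
--         result = result * i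
--         if m:
--             result = result % m
--     return result
-- ===== Notes on version B (the rewrite author's own statement) =====
-- stated objective: simpler
-- what changed: Replaces the balanced recursive product tree (with its re-modding of already-reduced subproducts) by a single linear left-to-right loop over range(low, high) that multiplies and reduces mod m as it goes.
-- intended difference: On the empty range low == high, A returns low (or low % m), an accident of its base case, while B returns the empty product 1 (or 1 % m), the intended value for a product over [low, high). — e.g. on factorial_consec_prod_tree(5, 5, 0): A returns 5, B returns 1
import Mathlib
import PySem

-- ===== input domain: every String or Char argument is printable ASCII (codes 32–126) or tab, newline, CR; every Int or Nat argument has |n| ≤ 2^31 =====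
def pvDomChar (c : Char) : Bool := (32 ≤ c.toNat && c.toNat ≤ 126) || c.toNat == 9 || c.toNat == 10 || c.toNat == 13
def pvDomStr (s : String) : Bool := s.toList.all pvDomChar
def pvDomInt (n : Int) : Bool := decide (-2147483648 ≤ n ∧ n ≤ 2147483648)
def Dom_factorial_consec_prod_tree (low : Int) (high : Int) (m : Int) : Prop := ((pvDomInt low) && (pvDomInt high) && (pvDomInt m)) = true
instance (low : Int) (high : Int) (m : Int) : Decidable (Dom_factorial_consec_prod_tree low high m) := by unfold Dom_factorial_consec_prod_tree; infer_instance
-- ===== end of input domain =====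

-- B replaces A's recursive product tree by one linear multiply-and-reduce loop over range(low, high)
-- (objective: simpler); on low == high B returns the empty product 1 (mod m) where A returns low — see D_ below.

-- ===== PORT A =====
lemma pv_mid_bounds (low high : Int) (h : low + 1 < high) :
    low + 1 ≤ PySem.Int.floordiv (high + low + 1) 2 ∧ PySem.Int.floordiv (high + low + 1) 2 < high :=
  ⟨(PySem.Int.le_floordiv_iff_mul_le (by norm_num)).mpr (by omega),
   (PySem.Int.floordiv_lt_iff_lt_mul (by norm_num)).mpr (by omega)⟩

def factorial_consec_prod_tree (low : Int) (high : Int) (m : Int) : Int :=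
  if h1 : high < low then
    if m = 0 then factorial_consec_prod_tree high low 0
    else PySem.Int.mod (factorial_consec_prod_tree high low m) m
  else if h2 : low + 1 < high then
    let mid := PySem.Int.floordiv (high + low + 1) 2
    if m = 0 then factorial_consec_prod_tree low mid 0 * factorial_consec_prod_tree mid high 0
    else PySem.Int.mod (factorial_consec_prod_tree low mid m * factorial_consec_prod_tree mid high m) m
  else if m = 0 then low else PySem.Int.mod low m
termination_by ((if high < low then 1 else 0 : Nat), (high - low).toNat)
decreasing_by
  · simp only [if_pos h1, if_neg (show ¬ low < high by omega)]
    exact Prod.Lex.left _ _ (by omega)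
  · simp only [if_pos h1, if_neg (show ¬ low < high by omega)]
    exact Prod.Lex.left _ _ (by omega)
  · obtain ⟨hb1, hb2⟩ := pv_mid_bounds low high h2
    simp only [if_neg (show ¬ PySem.Int.floordiv (high + low + 1) 2 < low by omega), if_neg h1]
    exact Prod.Lex.right _ (by omega)
  · obtain ⟨hb1, hb2⟩ := pv_mid_bounds low high h2
    simp only [if_neg (show ¬ high < PySem.Int.floordiv (high + low + 1) 2 by omega), if_neg h1]
    exact Prod.Lex.right _ (by omega)
  · obtain ⟨hb1, hb2⟩ := pv_mid_bounds low high h2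
    simp only [if_neg (show ¬ PySem.Int.floordiv (high + low + 1) 2 < low by omega), if_neg h1]
    exact Prod.Lex.right _ (by omega)
  · obtain ⟨hb1, hb2⟩ := pv_mid_bounds low high h2
    simp only [if_neg (show ¬ high < PySem.Int.floordiv (high + low + 1) 2 by omega), if_neg h1]
    exact Prod.Lex.right _ (by omega)


-- ===== PORT B =====
-- literal transliteration of Source B: swap if reversed, init 1 (or 1 % m), multiply (and reduce) over range(low, high)
def factorial_consec_prod_tree_alt (low : Int) (high : Int) (m : Int) : Int :=
  let lo := if high < low then high else low
  let hi := if high < low then low else high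
  let init : Int := if m = 0 then 1 else PySem.Int.mod 1 m
  (PySem.List.pyRange lo hi 1).foldl
    (fun result i =>
      let result := result * i
      if m = 0 then result else PySem.Int.mod result m) init


-- ===== PRECONDITION & SPEC =====
-- On the empty range low == high, A returns low (or low % m), an accident of its base case,
-- while B returns the empty product 1 (or 1 % m), the intended value for a product over [low, high).
def D_factorial_consec_prod_tree (low : Int) (high : Int) (m : Int) : Prop := low = high
instance (low : Int) (high : Int) (m : Int) : Decidable (D_factorial_consec_prod_tree low high m) := by unfold D_factorial_consec_prod_tree; infer_instance

def Spec_factorial_consec_prod_tree (low : Int) (high : Int) (m : Int) (out : Int) : Prop := ¬ D_factorial_consec_prod_tree low high m → out = factorial_consec_prod_tree_alt low high m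
instance (low : Int) (high : Int) (m : Int) (out : Int) : Decidable (Spec_factorial_consec_prod_tree low high m out) := by unfold Spec_factorial_consec_prod_tree; infer_instance

def pvDiffWitness_factorial_consec_prod_tree : Int × Int × Int := (5, 5, 0)
def pvDiffWitnessOut_factorial_consec_prod_tree : Int × Int := (5, 1)

-- ===== CLAIM (what is proved, stated in full; the proofs are below) =====
def Claim_unchanged_factorial_consec_prod_tree : Prop := ∀ (low : Int) (high : Int) (m : Int), Dom_factorial_consec_prod_tree low high m → Spec_factorial_consec_prod_tree low high m (factorial_consec_prod_tree low high m)
def Claim_changed_factorial_consec_prod_tree : Prop := Dom_factorial_consec_prod_tree (pvDiffWitness_factorial_consec_prod_tree.1) (pvDiffWitness_factorial_consec_prod_tree.2.1) (pvDiffWitness_factorial_consec_prod_tree.2.2) ∧ D_factorial_consec_prod_tree (pvDiffWitness_factorial_consec_prod_tree.1) (pvDiffWitness_factorial_consec_prod_tree.2.1) (pvDiffWitness_factorial_consec_prod_tree.2.2) ∧ factorial_consec_prod_tree (pvDiffWitness_factorial_consec_prod_tree.1) (pvDiffWitness_factorial_consec_prod_tree.2.1) (pvDiffWitness_factorial_consec_prod_tree.2.2)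 = pvDiffWitnessOut_factorial_consec_prod_tree.1 ∧ factorial_consec_prod_tree_alt (pvDiffWitness_factorial_consec_prod_tree.1) (pvDiffWitness_factorial_consec_prod_tree.2.1) (pvDiffWitness_factorial_consec_prod_tree.2.2) = pvDiffWitnessOut_factorial_consec_prod_tree.2 ∧ pvDiffWitnessOut_factorial_consec_prod_tree.1 ≠ pvDiffWitnessOut_factorial_consec_prod_tree.2

-- ===== LEMMAS AND PROOFS =====
lemma pv_mod_congr (a b m : Int) (hm : m ≠ 0) (h : m ∣ a - b) :
    PySem.Int.mod a m = PySem.Int.mod b m := by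
  have ha := PySem.Int.floordiv_mul_add_mod a m
  have hb := PySem.Int.floordiv_mul_add_mod b m
  have hd : m ∣ (PySem.Int.mod a m - PySem.Int.mod b m) := by
    obtain ⟨k, hk⟩ := h
    exact ⟨k - (PySem.Int.floordiv a m - PySem.Int.floordiv b m), by ring_nf; nlinarith [ha, hb, hk]⟩
  rcases lt_or_gt_of_ne hm with hneg | hpos
  · obtain ⟨b1, b2⟩ := PySem.Int.mod_neg_bounds a hneg
    obtain ⟨c1, c2⟩ := PySem.Int.mod_neg_bounds b hneg
    have := Int.eq_zero_of_abs_lt_dvd (Int.neg_dvd.mpr hd) (abs_lt.mpr ⟨by omega, by omega⟩)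
    omega
  · have b1 := PySem.Int.mod_nonneg a hpos; have b2 := PySem.Int.mod_lt a hpos
    have c1 := PySem.Int.mod_nonneg b hpos; have c2 := PySem.Int.mod_lt b hpos
    have := Int.eq_zero_of_abs_lt_dvd hd (abs_lt.mpr ⟨by omega, by omega⟩)
    omega

lemma pv_mod_idem (a m : Int) (hm : m ≠ 0) :
    PySem.Int.mod (PySem.Int.mod a m) m = PySem.Int.mod a m := by
  apply pv_mod_congr _ _ _ hm
  have := PySem.Int.floordiv_mul_add_mod a m
  exact ⟨-(PySem.Int.floordiv a m), by linarith⟩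

lemma pv_mod_mul (x y m : Int) (hm : m ≠ 0) :
    PySem.Int.mod (PySem.Int.mod x m * PySem.Int.mod y m) m = PySem.Int.mod (x * y) m := by
  apply pv_mod_congr _ _ _ hm
  have hx := PySem.Int.floordiv_mul_add_mod x m
  have hy := PySem.Int.floordiv_mul_add_mod y m
  refine ⟨-(PySem.Int.floordiv x m)*y - x*(PySem.Int.floordiv y m)
    + m*(PySem.Int.floordiv x m)*(PySem.Int.floordiv y m), ?_⟩
  have ex : PySem.Int.mod x m = x - PySem.Int.floordiv x m * m := by linarith
  have ey : PySem.Int.mod y m = y - PySem.Int.floordiv y m * m := by linarith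
  rw [ex, ey]; ring

lemma pv_A_zero (n : Nat) (low high : Int) (hn : (high - low).toNat = n) (h : low < high) :
    factorial_consec_prod_tree low high 0 = (PySem.List.pyRange low high 1).prod := by
  induction n using Nat.strong_induction_on generalizing low high with
  | _ n ih =>
    rw [factorial_consec_prod_tree]
    have h1 : ¬ high < low := by omega
    by_cases h2 : low + 1 < high
    · obtain ⟨hb1, hb2⟩ := pv_mid_bounds low high h2
      simp only [dif_neg h1, dif_pos h2, if_pos rfl]
      rw [ih (PySem.Int.floordiv (high + low + 1) 2 - low).toNat (by omega) low _ rfl (by omega),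
          ih (high - PySem.Int.floordiv (high + low + 1) 2).toNat (by omega) _ high rfl (by omega),
          PySem.List.pyRange_one_append low (PySem.Int.floordiv (high + low + 1) 2) high (by omega) (by omega),
          List.prod_append]
      simp
    · simp only [dif_neg h1, dif_neg h2, if_pos rfl]
      have hh : high = low + 1 := by omega
      subst hh
      rw [PySem.List.pyRange_one_singleton]
      simp

lemma pv_A_mod (n : Nat) (low high m : Int) (hn : (high - low).toNat = n) (h : low ≤ high) (hm : m ≠ 0) :
    factorial_consec_prod_tree low high m = PySem.Int.mod (factorial_consec_prod_tree low high 0) m := by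
  induction n using Nat.strong_induction_on generalizing low high with
  | _ n ih =>
    have h1 : ¬ high < low := by omega
    by_cases h2 : low + 1 < high
    · obtain ⟨hb1, hb2⟩ := pv_mid_bounds low high h2
      conv_lhs => rw [factorial_consec_prod_tree]
      conv_rhs => rw [factorial_consec_prod_tree]
      simp only [dif_neg h1, dif_pos h2, if_pos rfl, if_neg hm]
      rw [ih (PySem.Int.floordiv (high + low + 1) 2 - low).toNat (by omega) low _ rfl (by omega),
          ih (high - PySem.Int.floordiv (high + low + 1) 2).toNat (by omega) _ high rfl (by omega)]
      rw [pv_mod_mul _ _ _ hm]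
      simp
    · conv_lhs => rw [factorial_consec_prod_tree]
      conv_rhs => rw [factorial_consec_prod_tree]
      simp only [dif_neg h1, dif_neg h2, if_pos rfl, if_neg hm]
      simp

lemma pv_foldl_mul (l : List Int) (r : Int) :
    l.foldl (fun result i => result * i) r = r * l.prod := by
  induction l generalizing r with
  | nil => simp
  | cons i t ih => simp [List.foldl_cons, ih, mul_assoc]

lemma pv_mod_mul_left (x y m : Int) (hm : m ≠ 0) :
    PySem.Int.mod (PySem.Int.mod x m * y) m = PySem.Int.mod (x * y) m := by
  apply pv_mod_congr _ _ _ hm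
  have hx := PySem.Int.floordiv_mul_add_mod x m
  exact ⟨-(PySem.Int.floordiv x m)*y, by linear_combination y * hx⟩

lemma pv_foldl_mod (m : Int) (hm : m ≠ 0) (l : List Int) (r : Int)
    (hr : PySem.Int.mod r m = r) :
    l.foldl (fun result i => PySem.Int.mod (result * i) m) r = PySem.Int.mod (r * l.prod) m := by
  induction l generalizing r with
  | nil => rw [List.foldl_nil, List.prod_nil, mul_one, hr]
  | cons i t ih =>
    rw [List.foldl_cons, List.prod_cons, ih _ (pv_mod_idem _ _ hm),
        pv_mod_mul_left _ _ _ hm, mul_assoc]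

lemma pv_alt_eq (lo hi m : Int) (h : lo ≤ hi) :
    factorial_consec_prod_tree_alt lo hi m =
      if m = 0 then (PySem.List.pyRange lo hi 1).prod
      else PySem.Int.mod (PySem.List.pyRange lo hi 1).prod m := by
  unfold factorial_consec_prod_tree_alt
  have h1 : ¬ hi < lo := by omega
  by_cases hm : m = 0
  · simp only [if_neg h1, hm, if_true, ite_true]
    rw [pv_foldl_mul, one_mul]
  · simp only [if_neg h1, if_neg hm]
    rw [pv_foldl_mod m hm _ _ (pv_mod_idem 1 m hm), pv_mod_mul_left _ _ _ hm, one_mul]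

lemma pv_A_eq (lo hi m : Int) (h : lo < hi) :
    factorial_consec_prod_tree lo hi m =
      if m = 0 then (PySem.List.pyRange lo hi 1).prod
      else PySem.Int.mod (PySem.List.pyRange lo hi 1).prod m := by
  by_cases hm : m = 0
  · rw [if_pos hm, hm, pv_A_zero (hi - lo).toNat lo hi rfl h]
  · rw [if_neg hm, pv_A_mod (hi - lo).toNat lo hi m rfl (le_of_lt h) hm,
        pv_A_zero (hi - lo).toNat lo hi rfl h]

theorem main_thm (low high m : Int) (hD : low ≠ high) :
    factorial_consec_prod_tree low high m = factorial_consec_prod_tree_alt low high m := by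
  by_cases h1 : high < low
  · rw [factorial_consec_prod_tree]
    have halt : factorial_consec_prod_tree_alt low high m = factorial_consec_prod_tree_alt high low m := by
      unfold factorial_consec_prod_tree_alt
      simp only [if_pos h1, if_neg (show ¬ low < high by omega)]
    rw [halt, pv_alt_eq high low m (le_of_lt h1)]
    simp only [dif_pos h1]
    by_cases hm : m = 0
    · subst hm
      simp only [if_true, ite_true, if_pos rfl]
      rw [pv_A_eq high low 0 h1, if_pos rfl]
    · rw [if_neg hm, if_neg hm, pv_A_eq high low m h1, if_neg hm, pv_mod_idem _ _ hm]
  · have hlt : low < high := by omega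
    rw [pv_A_eq low high m hlt, pv_alt_eq low high m (le_of_lt hlt)]

-- ===== VERDICT (by name: the statement is the Claim_ definition above) =====
theorem factorial_consec_prod_tree_spec : Claim_unchanged_factorial_consec_prod_tree := by
  intro low high m _ hnd
  exact main_thm low high m (by simpa [D_factorial_consec_prod_tree] using hnd)

theorem factorial_consec_prod_tree_changed : Claim_changed_factorial_consec_prod_tree := by
  unfold Claim_changed_factorial_consec_prod_tree
  refine ⟨by decide, by decide, ?_, by decide, by decide⟩
  show factorial_consec_prod_tree 5 5 0 = 5
  rw [factorial_consec_prod_tree]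
  norm_num
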